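-- pv_equiv track=rewrite | github.com/onakasuitacity/compro_python_library | KyotoUniversityProgrammingContest2019/e_根付き森二人用ゲーム.py | solve_tree
-- ===== SOURCE A (Python) =====
-- def solve_tree(P):
--     n=len(P)+1
--     E=[[] for _ in range(n)]
--     for i,p in enumerate(P,1):
--         E[p].append(i)
--     even=[0]*n; odd=[0]*n # dp
--     def dfs(v): # 有向木だから親の情報要らない
--         if(not E[v]): # leafは(0,1)
--             odd[v]=1
--             return
--         e=o=1 # 子たちの最小値
--         for nv in E[v]:
--             dfs(nv)
--             e=min(e,even[nv])
--             o=min(o,odd[nv])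
--         even[v]=e^1
--         odd[v]=o^1
--     dfs(0)
--     return even[0],odd[0]
-- ===== SOURCE B (Python) =====
-- def solve_tree(P):
--     n = len(P) + 1
--     E = [[] for _ in range(n)]
--     for i, p in enumerate(P, 1):
--         E[p].append(i)
--     even = [0] * n
--     odd = [0] * n
--     # explicit two-phase post-order: a frame (v, False) expands v, (v, True) combines it
--     stack = [(0, False)]
--     while stack:
--         v, expanded = stack.pop()
--         if expanded:
--             e = o = 1
--             for c in E[v]:
--                 e = min(e, even[c])
--                 o = min(o, odd[c])
--             even[v] = e ^ 1
--             odd[v] = o ^ 1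
--         elif E[v]:
--             stack.append((v, True))
--             for c in reversed(E[v]):
--                 stack.append((c, False))
--         else:
--             odd[v] = 1
--     return even[0], odd[0]
-- ===== Notes on version B (the rewrite author's own statement) =====
-- stated objective: alternative
-- what changed: The recursive dfs closure mutating the dp arrays is replaced by an explicit iterative two-phase post-order stack machine (expand frames push children and a combine frame; the combine frame takes the min over the finished children) over the same adjacency list.
import Mathlib
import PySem

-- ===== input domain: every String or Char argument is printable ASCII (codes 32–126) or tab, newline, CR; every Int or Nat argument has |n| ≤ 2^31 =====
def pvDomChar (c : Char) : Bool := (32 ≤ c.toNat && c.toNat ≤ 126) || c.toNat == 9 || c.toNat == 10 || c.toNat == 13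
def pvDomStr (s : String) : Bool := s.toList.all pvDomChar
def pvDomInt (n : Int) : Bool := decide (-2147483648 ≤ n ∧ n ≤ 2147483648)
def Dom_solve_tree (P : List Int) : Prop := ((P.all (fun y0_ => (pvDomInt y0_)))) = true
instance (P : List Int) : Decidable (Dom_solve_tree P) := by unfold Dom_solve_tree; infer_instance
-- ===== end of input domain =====

-- B replaces A's recursive dfs by an explicit two-phase post-order stack machine; same return value.

-- ===== PORT A =====
-- shared adjacency builder: BOTH Pythons start with the identical loop
--   E=[[] for _ in range(n)]; for i,p in enumerate(P,1): E[p].append(i)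
-- (pyGetD/pySetD give Python's negative-index wraparound; out-of-range p raises in Python — excluded by Pre_)
def pvBuildE (P : List Int) : List (List Int) :=
  (PySem.List.enumerate P 1).foldl
    (fun E ip => PySem.List.pySetD E ip.2 ((PySem.List.pyGetD E ip.2 []) ++ [ip.1]))
    (List.replicate (P.length + 1) [])

-- A's recursive dfs; fuel n bounds the recursion depth (on Pre_ inputs the reachable part of the
-- graph is a tree of depth < n, so the fuel-0 branch is never reached there)
def pvDfsA (E : List (List Int)) : Nat → Int → List Int × List Int → List Int × List Int
  | 0, _, s => s
  | fuel+1, v, (even, odd) =>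
    let ch := PySem.List.pyGetD E v []
    if ch = [] then
      (even, PySem.List.pySetD odd v 1)
    else
      let r := ch.foldl
        (fun acc nv =>
          let s' := pvDfsA E fuel nv acc.1
          (s', min acc.2.1 (PySem.List.pyGetD s'.1 nv 0), min acc.2.2 (PySem.List.pyGetD s'.2 nv 0)))
        ((even, odd), 1, 1)
      (PySem.List.pySetD r.1.1 v (PySem.Int.bxor r.2.1 1),
       PySem.List.pySetD r.1.2 v (PySem.Int.bxor r.2.2 1))

def solve_tree (P : List Int) : Int × Int :=
  let E := pvBuildE P
  let s := pvDfsA E (P.length + 1) 0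
            (List.replicate (P.length + 1) 0, List.replicate (P.length + 1) 0)
  (PySem.List.pyGetD s.1 0 0, PySem.List.pyGetD s.2 0 0)

-- ===== PORT B =====
-- B's while-loop over the explicit stack; each iteration pops one frame and consumes one fuel.
-- On Pre_ inputs at most 2*n frames are ever processed, so fuel 2*n is never exhausted there.
def pvRunB (E : List (List Int)) : Nat → List (Int × Bool) → List Int × List Int → List Int × List Int
  | 0, _, s => s
  | _+1, [], s => s
  | fuel+1, (v, expanded) :: rest, (even, odd) =>
    if expanded then
      let eo := (PySem.List.pyGetD E v []).foldl
        (fun acc c => (min acc.1 (PySem.List.pyGetD even c 0), min acc.2 (PySem.List.pyGetD odd c 0)))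
        (1, 1)
      pvRunB E fuel rest
        (PySem.List.pySetD even v (PySem.Int.bxor eo.1 1),
         PySem.List.pySetD odd v (PySem.Int.bxor eo.2 1))
    else if PySem.List.pyGetD E v [] ≠ [] then
      pvRunB E fuel
        ((PySem.List.pyGetD E v []).reverse.foldl (fun st c => (c, false) :: st) ((v, true) :: rest))
        (even, odd)
    else
      pvRunB E fuel rest (even, PySem.List.pySetD odd v 1)

def solve_tree_alt (P : List Int) : Int × Int :=
  let E := pvBuildE P
  let s := pvRunB E (2 * (P.length + 1)) [(0, false)]
            (List.replicate (P.length + 1) 0, List.replicate (P.length + 1) 0)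
  (PySem.List.pyGetD s.1 0 0, PySem.List.pyGetD s.2 0 0)

-- ===== PRECONDITION & SPEC =====
-- Pre_ keeps exactly the parent indices Python's E[p] accepts (-n ≤ p < n, n = len(P)+1);
-- outside it both Pythons raise IndexError while building E.
def Pre_solve_tree (P : List Int) : Prop :=
  ∀ p ∈ P, -((P.length : Int) + 1) ≤ p ∧ p < (P.length : Int) + 1
instance (P : List Int) : Decidable (Pre_solve_tree P) := by unfold Pre_solve_tree; infer_instance

def pvWitness_solve_tree : List Int := [0, 0, 1]

def Spec_solve_tree (P : List Int) (out : Int × Int) : Prop := out = solve_tree_alt P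
instance (P : List Int) (out : Int × Int) : Decidable (Spec_solve_tree P out) := by
  unfold Spec_solve_tree; infer_instance

-- ===== CLAIM (what is proved, stated in full; the proofs are below) =====
def Claim_equal_solve_tree : Prop :=
  ∀ (P : List Int), Dom_solve_tree P → Pre_solve_tree P → Spec_solve_tree P (solve_tree P)

-- ===== LEMMAS AND PROOFS =====

-- number of nodes
def pvN (P : List Int) : Nat := P.length + 1

-- Python's wraparound of an in-range index
def pvNorm (P : List Int) (p : Int) : Int := if p < 0 then p + pvN P else p

-- the (unique) parent of node c, if c is a child node
def pvPar (P : List Int) (c : Int) : Option Int :=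
  if 1 ≤ c ∧ c ≤ (P.length : Int) then some (pvNorm P (P.getD (c - 1).toNat 0)) else none

-- the k-fold parent chain
def pvChain (P : List Int) : Nat → Int → Option Int
  | 0, u => some u
  | k+1, u => (pvChain P k u).bind (pvPar P)

-- the multiset of nodes dfs with that much fuel visits below v
def pvReach (E : List (List Int)) : Nat → Int → List Int
  | 0, _ => []
  | f+1, v => v :: (PySem.List.pyGetD E v []).flatMap (pvReach E f)

-- fuel f suffices for the dfs below v
def pvEnough (E : List (List Int)) : Nat → Int → Prop
  | 0, _ => False
  | f+1, v => ∀ c ∈ PySem.List.pyGetD E v [], pvEnough E f c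

-- exact number of machine steps for the subtree below v
def pvCost (E : List (List Int)) : Nat → Int → Nat
  | 0, _ => 0
  | f+1, v =>
    if PySem.List.pyGetD E v [] = [] then 1
    else 2 + ((PySem.List.pyGetD E v []).map (pvCost E f)).sum

-- E is a correct adjacency structure for P
def pvGoodE (P : List Int) (E : List (List Int)) : Prop :=
  E.length = pvN P ∧
  ∀ v : Int, 0 ≤ v → v < (pvN P : Int) →
    (PySem.List.pyGetD E v []).Nodup ∧
    ∀ c : Int, c ∈ PySem.List.pyGetD E v [] ↔ pvPar P c = some v

theorem pvPar_range (P : List Int) (hP : Pre_solve_tree P) {c w : Int}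
    (h : pvPar P c = some w) : 0 ≤ w ∧ w < (pvN P : Int) := by
  unfold pvPar at h
  split_ifs at h with hc
  have hidx : (c - 1).toNat < P.length := by omega
  have hmem : P.getD (c - 1).toNat 0 ∈ P := by
    rw [List.getD_eq_getElem P 0 hidx]
    exact List.getElem_mem hidx
  have hb := hP _ hmem
  have hw : pvNorm P (P.getD (c - 1).toNat 0) = w := Option.some.inj h
  unfold pvNorm pvN at hw
  unfold pvN
  split_ifs at hw <;> push_cast at hw ⊢ <;> omega

theorem pvPar_dom {P : List Int} {c w : Int} (h : pvPar P c = some w) :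
    1 ≤ c ∧ c ≤ (P.length : Int) := by
  unfold pvPar at h
  split_ifs at h with hc
  exact hc

theorem pvChain_add (P : List Int) (a b : Nat) (u : Int) :
    pvChain P (a + b) u = (pvChain P a u).bind (pvChain P b) := by
  induction b with
  | zero => cases pvChain P a u <;> simp [pvChain]
  | succ b ih =>
    rw [← Nat.add_assoc]
    show (pvChain P (a + b) u).bind (pvPar P) = _
    rw [ih]
    cases pvChain P a u with
    | none => simp
    | some w => simp [pvChain]

theorem pvChain_zero_ne (P : List Int) (m : Nat) (hm : 0 < m) : pvChain P m 0 = none := by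
  induction m with
  | zero => omega
  | succ m ih =>
    rcases Nat.eq_zero_or_pos m with h0 | hpos
    · subst h0
      show (pvChain P 0 0).bind (pvPar P) = none
      simp [pvChain, pvPar]
    · show (pvChain P m 0).bind (pvPar P) = none
      rw [ih hpos]
      rfl

theorem pvIdx_norm (P : List Int) (p : Int) (h1 : -((pvN P : Nat) : Int) ≤ p)
    (h2 : p < ((pvN P : Nat) : Int)) :
    PySem.List.pyIdx? (pvN P) p = some (pvNorm P p).toNat := by
  unfold PySem.List.pyIdx? pvNorm
  by_cases hneg : p < 0
  · rw [if_neg (by omega), if_pos (by omega), if_pos hneg]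
    congr 1
    omega
  · rw [if_pos (by omega), if_pos h2, if_neg hneg]

theorem pvSetD_norm (P : List Int) (A : List (List Int)) (hlen : A.length = pvN P) (p : Int)
    (h1 : -((pvN P : Nat) : Int) ≤ p) (h2 : p < ((pvN P : Nat) : Int)) (x : List Int) :
    PySem.List.pySetD A p x = A.set (pvNorm P p).toNat x := by
  unfold PySem.List.pySetD PySem.List.pySet?
  rw [hlen, pvIdx_norm P p h1 h2]
  rfl

theorem pvGetD_norm (P : List Int) (A : List (List Int)) (hlen : A.length = pvN P) (p : Int)
    (h1 : -((pvN P : Nat) : Int) ≤ p) (h2 : p < ((pvN P : Nat) : Int)) :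
    PySem.List.pyGetD A p [] = A.getD (pvNorm P p).toNat [] := by
  unfold PySem.List.pyGetD PySem.List.pyGet?
  rw [hlen, pvIdx_norm P p h1 h2]
  simp [List.getD_eq_getElem?_getD]

theorem pvNorm_lt (P : List Int) (p : Int) (h1 : -((pvN P : Nat) : Int) ≤ p)
    (h2 : p < ((pvN P : Nat) : Int)) : (pvNorm P p).toNat < pvN P := by
  unfold pvNorm
  split_ifs <;> omega

theorem pvBuildE_fold_get (P : List Int) :
    ∀ (l : List (Int × Int)) (Acc : List (List Int)), Acc.length = pvN P →
      (∀ ip ∈ l, -((pvN P : Nat) : Int) ≤ ip.2 ∧ ip.2 < ((pvN P : Nat) : Int)) →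
      ∀ v : Nat, v < pvN P →
      (l.foldl (fun E ip =>
          PySem.List.pySetD E ip.2 ((PySem.List.pyGetD E ip.2 []) ++ [ip.1])) Acc).getD v []
        = Acc.getD v []
          ++ (l.filter (fun ip => decide ((pvNorm P ip.2).toNat = v))).map Prod.fst := by
  intro l
  induction l with
  | nil => intro Acc _ _ v _; simp
  | cons ip l ihl =>
    obtain ⟨i, p⟩ := ip
    intro Acc hlen hb v hv
    have hp := hb (i, p) (by simp)
    have hset := pvSetD_norm P Acc hlen p hp.1 hp.2 ((PySem.List.pyGetD Acc p []) ++ [i])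
    have hget := pvGetD_norm P Acc hlen p hp.1 hp.2
    simp only [List.foldl_cons]
    rw [ihl _ (by rw [hset]; simp [hlen]) (fun ip hip => hb ip (by simp [hip])) v hv]
    rw [hset, hget]
    by_cases hpv : (pvNorm P p).toNat = v
    · subst hpv
      rw [List.getD_eq_getElem?_getD, List.getElem?_set_self (by
          rw [hlen]; exact pvNorm_lt P p hp.1 hp.2)]
      simp
    · rw [List.getD_eq_getElem?_getD (l := Acc.set _ _), List.getElem?_set_ne hpv]
      simp [hpv, List.getD_eq_getElem?_getD]

theorem pvBuildE_length (P : List Int) : (pvBuildE P).length = pvN P := by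
  unfold pvBuildE
  have : ∀ (l : List (Int × Int)) (Acc : List (List Int)),
      (l.foldl (fun E ip =>
          PySem.List.pySetD E ip.2 ((PySem.List.pyGetD E ip.2 []) ++ [ip.1])) Acc).length
        = Acc.length := by
    intro l
    induction l with
    | nil => intro Acc; rfl
    | cons ip l ihl => intro Acc; simp only [List.foldl_cons]; rw [ihl]; simp
  rw [this]
  simp [pvN]

theorem pvBuildE_good (P : List Int) (hP : Pre_solve_tree P) : pvGoodE P (pvBuildE P) := by
  have hNc : ((pvN P : Nat) : Int) = (P.length : Int) + 1 := by unfold pvN; push_cast; omega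
  have hb : ∀ ip ∈ PySem.List.enumerate P 1,
      -((pvN P : Nat) : Int) ≤ ip.2 ∧ ip.2 < ((pvN P : Nat) : Int) := by
    intro ip hip
    obtain ⟨k, hk, rfl⟩ := (PySem.List.mem_enumerate_iff P 1 ip).mp hip
    have hmem : P[k] ∈ P := List.getElem_mem hk
    have := hP _ hmem
    constructor <;> omega
  have hchar : ∀ v : Nat, v < pvN P →
      (pvBuildE P).getD v []
        = ((PySem.List.enumerate P 1).filter
            (fun ip => decide ((pvNorm P ip.2).toNat = v))).map Prod.fst := by
    intro v hv
    unfold pvBuildE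
    rw [pvBuildE_fold_get P (PySem.List.enumerate P 1) _ (by simp [pvN]) hb v hv]
    simp
  refine ⟨pvBuildE_length P, ?_⟩
  intro v hv0 hvN
  have hvlt : v.toNat < pvN P := by omega
  have hget : PySem.List.pyGetD (pvBuildE P) v [] = (pvBuildE P).getD v.toNat [] := by
    have := pvGetD_norm P (pvBuildE P) (pvBuildE_length P) v (by omega) hvN
    rw [this]
    unfold pvNorm
    rw [if_neg (by omega)]
  rw [hget, hchar v.toNat hvlt]
  constructor
  · -- Nodup: first components of enumerate are strictly increasing
    have hpw : ((PySem.List.enumerate P 1).filter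
        (fun ip => decide ((pvNorm P ip.2).toNat = v.toNat))).Pairwise (fun p q => p.1 < q.1) :=
      (PySem.List.pairwise_lt_enumerate P 1).sublist List.filter_sublist
    have := (List.pairwise_map.mpr (hpw.imp (fun h => ne_of_lt h)))
    exact this
  · intro c
    constructor
    · intro hc
      obtain ⟨ip, hip, rfl⟩ := List.mem_map.mp hc
      have hmemf := List.mem_filter.mp hip
      obtain ⟨k, hk, rfl⟩ := (PySem.List.mem_enumerate_iff P 1 ip).mp hmemf.1
      have hq : (pvNorm P P[k]).toNat = v.toNat := by simpa using hmemf.2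
      have hpk := hP _ (List.getElem_mem hk)
      unfold pvPar
      rw [if_pos (by constructor <;> omega)]
      have hgd : P.getD ((1 : Int) + (k : Int) - 1).toNat 0 = P[k] := by
        rw [show ((1 : Int) + (k : Int) - 1).toNat = k by omega]
        exact List.getD_eq_getElem P 0 hk
      rw [hgd]
      congr 1
      have hnn : 0 ≤ pvNorm P P[k] := by unfold pvNorm; split_ifs <;> omega
      omega
    · intro hc
      have hdom := pvPar_dom hc
      unfold pvPar at hc
      rw [if_pos hdom] at hc
      have hpar := Option.some.inj hc
      apply List.mem_map.mpr
      have hkidx : (c - 1).toNat < P.length := by omega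
      refine ⟨((1 : Int) + ((c - 1).toNat : Int), P[(c - 1).toNat]), ?_, by push_cast; omega⟩
      apply List.mem_filter.mpr
      constructor
      · exact (PySem.List.mem_enumerate_iff P 1 _).mpr ⟨(c - 1).toNat, hkidx, rfl⟩
      · have hgd : P.getD (c - 1).toNat 0 = P[(c - 1).toNat] := List.getD_eq_getElem P 0 hkidx
        rw [hgd] at hpar
        simp only [decide_eq_true_eq]
        omega

theorem pvSumAdd (l : List Int) (f g : Int → Nat) :
    (l.map (fun c => f c + g c)).sum = (l.map f).sum + (l.map g).sum := by
  induction l with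
  | nil => rfl
  | cons a l ihl => simp only [List.map_cons, List.sum_cons, ihl]; omega

theorem pvReach_count (P : List Int) (E : List (List Int)) (hE : pvGoodE P E) :
    ∀ (f : Nat) (v : Int), 0 ≤ v → v < (pvN P : Int) → ∀ u : Int,
      (pvReach E f v).count u
        = (List.range f).countP (fun k => decide (pvChain P k u = some v)) := by
  intro f
  induction f with
  | zero => intro v _ _ u; simp [pvReach]
  | succ f ih =>
    intro v hv0 hvN u
    have hch := hE.2 v hv0 hvN
    -- count over the flatMap is the sum of the children's counts
    have hcount_flat : ∀ (l : List Int),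
        (l.flatMap (pvReach E f)).count u = (l.map (fun c => (pvReach E f c).count u)).sum := by
      intro l
      induction l with
      | nil => rfl
      | cons c l ihl => simp [List.flatMap_cons, List.count_append, ihl]
    -- pointwise: being some child of v is having parent v
    have aux3 : ∀ (o : Option Int),
        ((PySem.List.pyGetD E v []).map (fun c => if decide (o = some c) = true then 1 else 0)).sum
          = if o.bind (pvPar P) = some v then 1 else 0 := by
      intro o
      cases o with
      | none => simp
      | some w =>
        by_cases hw : w ∈ PySem.List.pyGetD E v []
        · have hpar := (hch.2 w).mp hw
          rw [show (some w).bind (pvPar P) = pvPar P w from rfl, hpar, if_pos rfl]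
          have count_ind : ∀ (l : List Int), l.Nodup → w ∈ l →
              (l.map (fun c => if decide (some w = some c) = true then 1 else 0)).sum = 1 := by
            intro l
            induction l with
            | nil => intro _ hw'; exact absurd hw' (by simp)
            | cons a l ihl =>
              intro hnd hw'
              rcases List.mem_cons.mp hw' with h | hw''
              · subst h
                have ha : w ∉ l := (List.nodup_cons.mp hnd).1
                have hz : (l.map (fun c => if decide (some w = some c) = true then 1 else 0)).sum = 0 := by
                  apply List.sum_eq_zero
                  intro x hx
                  obtain ⟨c, hc, rfl⟩ := List.mem_map.mp hx
                  have : w ≠ c := fun h => ha (h ▸ hc)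
                  simp [this]
                simp only [List.map_cons, List.sum_cons, hz]
                simp
              · have ha : a ≠ w := by
                  rintro rfl; exact (List.nodup_cons.mp hnd).1 hw''
                have := ihl (List.nodup_cons.mp hnd).2 hw''
                simp only [List.map_cons, List.sum_cons, this]
                simp [Ne.symm ha]
          exact count_ind _ hch.1 hw
        · have hpar : pvPar P w ≠ some v := fun h => hw ((hch.2 w).mpr h)
          rw [show (some w).bind (pvPar P) = pvPar P w from rfl, if_neg hpar]
          apply List.sum_eq_zero
          intro x hx
          obtain ⟨c, hc, rfl⟩ := List.mem_map.mp hx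
          have : w ≠ c := by rintro rfl; exact hw hc
          simp [this]
    -- the sum over children of chain-counts is one chain-count with a bind
    have aux2 : ∀ (rs : List Nat),
        ((PySem.List.pyGetD E v []).map
            (fun c => rs.countP (fun k => decide (pvChain P k u = some c)))).sum
          = rs.countP (fun k => decide ((pvChain P k u).bind (pvPar P) = some v)) := by
      intro rs
      induction rs with
      | nil => simp
      | cons r rs ihr =>
        simp only [List.countP_cons]
        have hsplit : ((PySem.List.pyGetD E v []).map
            (fun c => rs.countP (fun k => decide (pvChain P k u = some c))
              + if decide (pvChain P r u = some c) = true then 1 else 0)).sum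
            = ((PySem.List.pyGetD E v []).map
                (fun c => rs.countP (fun k => decide (pvChain P k u = some c)))).sum
              + ((PySem.List.pyGetD E v []).map
                  (fun c => if decide (pvChain P r u = some c) = true then 1 else 0)).sum :=
          pvSumAdd _ _ _
        rw [hsplit, ihr, aux3 (pvChain P r u)]
        simp
    -- children are in range, so the inductive hypothesis applies to them
    have hchild : ∀ c ∈ PySem.List.pyGetD E v [],
        (pvReach E f c).count u = (List.range f).countP (fun k => decide (pvChain P k u = some c)) := by
      intro c hc
      have hdom := pvPar_dom ((hch.2 c).mp hc)
      exact ih c (by omega) (by unfold pvN; push_cast; omega) u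
    have hmapeq : ((PySem.List.pyGetD E v []).map (fun c => (pvReach E f c).count u)).sum
        = ((PySem.List.pyGetD E v []).map
            (fun c => (List.range f).countP (fun k => decide (pvChain P k u = some c)))).sum := by
      apply congrArg
      exact List.map_congr_left hchild
    show (v :: (PySem.List.pyGetD E v []).flatMap (pvReach E f)).count u = _
    rw [List.count_cons, hcount_flat, hmapeq, aux2]
    rw [List.range_succ_eq_map, List.countP_cons, List.countP_map]
    have hcomp : ((fun k => decide (pvChain P k u = some v)) ∘ Nat.succ)
        = fun k => decide ((pvChain P k u).bind (pvPar P) = some v) := by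
      funext k; rfl
    rw [hcomp]
    by_cases huv : u = v
    · subst huv; simp [pvChain]
    · simp [pvChain, huv, Ne.symm huv]

theorem pvChain_two_zero (P : List Int) {u : Int} {a b : Nat} (hab : a < b)
    (h1 : pvChain P a u = some 0) (h2 : pvChain P b u = some 0) : False := by
  have hb : pvChain P (a + (b - a)) u = pvChain P (b - a) 0 := by
    rw [pvChain_add, h1]
    rfl
  rw [show a + (b - a) = b by omega, h2, pvChain_zero_ne P (b - a) (by omega)] at hb
  exact absurd hb (by simp)

theorem pvReach_nodup (P : List Int) (E : List (List Int)) (hE : pvGoodE P E) (f : Nat) :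
    (pvReach E f 0).Nodup := by
  have hN : (0 : Int) < (pvN P : Int) := by unfold pvN; push_cast; omega
  rw [List.nodup_iff_count_le_one]
  intro u
  rw [pvReach_count P E hE f 0 le_rfl hN u]
  by_contra h
  push Not at h
  rw [List.countP_eq_length_filter] at h
  have hnd : ((List.range f).filter (fun k => decide (pvChain P k u = some 0))).Nodup :=
    List.Nodup.filter _ (List.nodup_range)
  rcases hfil : (List.range f).filter (fun k => decide (pvChain P k u = some 0)) with _ | ⟨k1, l1⟩
  · rw [hfil] at h; simp at h
  rcases l1 with _ | ⟨k2, t⟩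
  · rw [hfil] at h; simp at h
  have hm1 : k1 ∈ (List.range f).filter (fun k => decide (pvChain P k u = some 0)) := by
    rw [hfil]; simp
  have hm2 : k2 ∈ (List.range f).filter (fun k => decide (pvChain P k u = some 0)) := by
    rw [hfil]; simp
  have hp1 : pvChain P k1 u = some 0 := by
    have := (List.mem_filter.mp hm1).2; simpa using this
  have hp2 : pvChain P k2 u = some 0 := by
    have := (List.mem_filter.mp hm2).2; simpa using this
  have hne : k1 ≠ k2 := by
    rw [hfil] at hnd
    intro he
    exact (List.nodup_cons.mp hnd).1 (he ▸ List.mem_cons_self)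
  rcases Nat.lt_or_ge k1 k2 with hlt | hge
  · exact pvChain_two_zero P hlt hp1 hp2
  · exact pvChain_two_zero P (by omega) hp2 hp1

theorem pvReach_range (P : List Int) (E : List (List Int)) (hE : pvGoodE P E) :
    ∀ (f : Nat) (v : Int), 0 ≤ v → v < (pvN P : Int) →
      ∀ x ∈ pvReach E f v, 0 ≤ x ∧ x < (pvN P : Int) := by
  intro f
  induction f with
  | zero => intro v _ _ x hx; exact absurd hx (by simp [pvReach])
  | succ f ih =>
    intro v hv0 hvN x hx
    simp only [pvReach, List.mem_cons, List.mem_flatMap] at hx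
    rcases hx with rfl | ⟨c, hc, hxc⟩
    · exact ⟨hv0, hvN⟩
    · have hpar := ((hE.2 v hv0 hvN).2 c).mp hc
      have hdom := pvPar_dom hpar
      have hc0 : 0 ≤ c := by omega
      have hcN : c < (pvN P : Int) := by unfold pvN; push_cast; omega
      exact ih c hc0 hcN x hxc

theorem pvNodupRange_length (N : Nat) (l : List Int) (hnd : l.Nodup)
    (hr : ∀ x ∈ l, 0 ≤ x ∧ x < (N : Int)) : l.length ≤ N := by
  have hmap : (l.map Int.toNat).Nodup := by
    refine List.Nodup.map_on ?_ hnd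
    intro x hx y hy hxy
    have := hr x hx; have := hr y hy
    omega
  have hsub : l.map Int.toNat ⊆ List.range N := by
    intro m hm
    obtain ⟨x, hx, rfl⟩ := List.mem_map.mp hm
    have := hr x hx
    simp only [List.mem_range]
    omega
  calc l.length = (l.map Int.toNat).length := by simp
    _ = (l.map Int.toNat).toFinset.card := (List.toFinset_card_of_nodup hmap).symm
    _ ≤ (List.range N).toFinset.card := Finset.card_le_card (fun m hm => by
          simp only [List.mem_toFinset] at hm ⊢; exact hsub hm)
    _ ≤ (List.range N).length := List.toFinset_card_le _
    _ = N := List.length_range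

theorem pvEnough_root (P : List Int) (E : List (List Int)) (hP : Pre_solve_tree P)
    (hE : pvGoodE P E) : pvEnough E (pvN P) 0 := by
  have aux1 : ∀ (f : Nat) (v : Int), 0 ≤ v → v < (pvN P : Int) →
      (∀ (u : Int) (k : Nat), pvChain P k u = some v → k < f) → pvEnough E f v := by
    intro f
    induction f with
    | zero => intro v _ _ hS; exact absurd (hS v 0 rfl) (by omega)
    | succ f ih =>
      intro v hv0 hvN hS
      show ∀ c ∈ PySem.List.pyGetD E v [], pvEnough E f c
      intro c hc
      have hpar := ((hE.2 v hv0 hvN).2 c).mp hc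
      have hdom := pvPar_dom hpar
      apply ih c (by omega) (by unfold pvN; push_cast; omega)
      intro u k hk
      have hk1 : pvChain P (k + 1) u = some v := by
        show (pvChain P k u).bind (pvPar P) = some v
        rw [hk]
        exact hpar
      have := hS u (k + 1) hk1
      omega
  apply aux1 (pvN P) 0 le_rfl (by unfold pvN; push_cast; omega)
  intro u k hk
  by_contra hkN
  push Not at hkN
  have hN1 : 1 ≤ pvN P := by unfold pvN; omega
  have hdef : ∀ j, j ≤ k → ∃ w, pvChain P j u = some w := by
    intro j hj
    rcases hw : pvChain P j u with _ | w
    · exfalso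
      have hnone : pvChain P (j + (k - j)) u = none := by
        rw [pvChain_add, hw]
        rfl
      rw [show j + (k - j) = k by omega, hk] at hnone
      exact absurd hnone (by simp)
    · exact ⟨w, rfl⟩
  have hdist : ∀ j1 j2, j1 < j2 → j2 ≤ k → pvChain P j1 u ≠ pvChain P j2 u := by
    intro j1 j2 h12 h2k heq
    obtain ⟨w, hw⟩ := hdef j1 (by omega)
    have hcyc : pvChain P (j2 - j1) w = some w := by
      have h' : pvChain P (j1 + (j2 - j1)) u = pvChain P (j2 - j1) w := by
        rw [pvChain_add, hw]; rfl
      rw [show j1 + (j2 - j1) = j2 by omega, ← heq, hw] at h'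
      exact h'.symm
    have hto0 : pvChain P (k - j1) w = some 0 := by
      have h' : pvChain P (j1 + (k - j1)) u = pvChain P (k - j1) w := by
        rw [pvChain_add, hw]; rfl
      rw [show j1 + (k - j1) = k by omega, hk] at h'
      exact h'.symm
    have h1 : pvChain P ((k - j1) + (j2 - j1)) w = some 0 := by
      have h' : pvChain P ((j2 - j1) + (k - j1)) w = pvChain P (k - j1) w := by
        rw [pvChain_add, hcyc]; rfl
      rw [show (j2 - j1) + (k - j1) = (k - j1) + (j2 - j1) by omega] at h'
      rw [h', hto0]
    have h2 : pvChain P ((k - j1) + (j2 - j1)) w = none := by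
      rw [pvChain_add, hto0]
      show pvChain P (j2 - j1) 0 = none
      exact pvChain_zero_ne P _ (by omega)
    rw [h1] at h2
    exact absurd h2 (by simp)
  have hval : ∀ j, 1 ≤ j → j ≤ k → ∀ w, pvChain P j u = some w → 0 ≤ w ∧ w < (pvN P : Int) := by
    intro j hj1 hjk w hw
    obtain ⟨w', hw'⟩ := hdef (j - 1) (by omega)
    have hstep : pvChain P ((j - 1) + 1) u = (pvChain P (j - 1) u).bind (pvPar P) := rfl
    rw [show (j - 1) + 1 = j by omega, hw, hw'] at hstep
    exact pvPar_range P hP hstep.symm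
  have hk1 : 1 ≤ k := by omega
  have hu : 0 ≤ u ∧ u < (pvN P : Int) := by
    obtain ⟨w1, hw1⟩ := hdef 1 hk1
    have hw1' : pvPar P u = some w1 := hw1
    have hdom := pvPar_dom hw1'
    refine ⟨by omega, by unfold pvN; push_cast; omega⟩
  have hnd : ((List.range (k + 1)).map (fun j => (pvChain P j u).getD 0)).Nodup := by
    refine List.Nodup.map_on ?_ List.nodup_range
    intro j1 h1 j2 h2 hjeq
    simp only [List.mem_range] at h1 h2
    by_contra hne
    obtain ⟨w1, hw1⟩ := hdef j1 (by omega)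
    obtain ⟨w2, hw2⟩ := hdef j2 (by omega)
    rcases Nat.lt_or_ge j1 j2 with hlt | hge
    · exact hdist j1 j2 hlt (by omega) (by rw [hw1, hw2]; simp_all)
    · exact hdist j2 j1 (by omega) (by omega) (by rw [hw1, hw2]; simp_all)
  have hrange : ∀ x ∈ (List.range (k + 1)).map (fun j => (pvChain P j u).getD 0),
      0 ≤ x ∧ x < ((pvN P : Nat) : Int) := by
    intro x hx
    obtain ⟨j, hj, rfl⟩ := List.mem_map.mp hx
    simp only [List.mem_range] at hj
    rcases Nat.eq_zero_or_pos j with rfl | hj1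
    · exact hu
    · obtain ⟨w, hw⟩ := hdef j (by omega)
      rw [hw]
      exact hval j hj1 (by omega) w hw
  have hlen := pvNodupRange_length (pvN P) _ hnd hrange
  simp only [List.length_map, List.length_range] at hlen
  omega

theorem pvCost_le (E : List (List Int)) : ∀ (f : Nat) (v : Int),
    pvCost E f v ≤ 2 * (pvReach E f v).length := by
  intro f
  induction f with
  | zero => intro v; simp [pvCost, pvReach]
  | succ f ih =>
    intro v
    simp only [pvCost, pvReach, List.length_cons, List.length_flatMap]
    split_ifs with h
    · omega
    · have hsum : ((PySem.List.pyGetD E v []).map (pvCost E f)).sum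
          ≤ ((PySem.List.pyGetD E v []).map (fun c => 2 * (pvReach E f c).length)).sum := by
        apply List.sum_le_sum
        intro c _
        exact ih c
      have h2 : ((PySem.List.pyGetD E v []).map (fun c => 2 * (pvReach E f c).length)).sum
          = 2 * ((PySem.List.pyGetD E v []).map (fun c => (pvReach E f c).length)).sum := by
        induction PySem.List.pyGetD E v [] with
        | nil => rfl
        | cons a l ihl => simp only [List.map_cons, List.sum_cons, ihl]; ring
      have h3 : ((PySem.List.pyGetD E v []).map (fun a => ((fun c => pvReach E f c) a).length)).sum
          = ((PySem.List.pyGetD E v []).map (fun c => (pvReach E f c).length)).sum := rfl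
      omega

-- read/write lemmas for the dp arrays (all indices used are nonnegative)
theorem pvRW_ne (l : List Int) (v u x : Int) (hv : 0 ≤ v) (hu : 0 ≤ u) (hne : u ≠ v) :
    PySem.List.pyGetD (PySem.List.pySetD l v x) u 0 = PySem.List.pyGetD l u 0 := by
  rw [PySem.List.pySetD_of_nonneg l x hv]
  have hu' : u = ((u.toNat : Nat) : Int) := by omega
  rw [hu', PySem.List.pyGetD_natCast, PySem.List.pyGetD_natCast]
  have hne' : v.toNat ≠ u.toNat := by omega
  simp [List.getD, List.getElem?_set_ne hne']

theorem pvSetD_length (l : List Int) (v x : Int) :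
    (PySem.List.pySetD l v x).length = l.length := PySem.List.length_pySetD l v x

-- the .1 component of A's inner fold is the plain state fold
theorem pvFoldA_fst (E : List (List Int)) (f : Nat) :
    ∀ (l : List Int) (acc : (List Int × List Int) × Int × Int),
      (l.foldl (fun acc nv =>
          (pvDfsA E f nv acc.1,
           min acc.2.1 (PySem.List.pyGetD (pvDfsA E f nv acc.1).1 nv 0),
           min acc.2.2 (PySem.List.pyGetD (pvDfsA E f nv acc.1).2 nv 0))) acc).1
      = l.foldl (fun t c => pvDfsA E f c t) acc.1 := by
  intro l
  induction l with
  | nil => intro acc; rfl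
  | cons c l ihl => intro acc; simp only [List.foldl_cons]; exact ihl _

-- pushing the reversed child list one frame at a time
theorem pvPush_eq : ∀ (l : List Int) (st : List (Int × Bool)),
    l.reverse.foldl (fun st c => (c, false) :: st) st = l.map (fun c => (c, false)) ++ st := by
  intro l
  induction l with
  | nil => intro st; rfl
  | cons c l ihl =>
    intro st
    simp only [List.reverse_cons, List.foldl_append, List.foldl_cons, List.foldl_nil, List.map_cons]
    rw [ihl]
    rfl

theorem pvDfsA_length (E : List (List Int)) : ∀ (f : Nat) (v : Int) (s : List Int × List Int),
    (pvDfsA E f v s).1.length = s.1.length ∧ (pvDfsA E f v s).2.length = s.2.length := by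
  intro f
  induction f with
  | zero => exact fun v s => ⟨rfl, rfl⟩
  | succ f ih =>
    intro v s
    obtain ⟨ev, od⟩ := s
    have hfold : ∀ (l : List Int) (t : List Int × List Int),
        ((l.foldl (fun t c => pvDfsA E f c t) t).1.length = t.1.length ∧
         (l.foldl (fun t c => pvDfsA E f c t) t).2.length = t.2.length) := by
      intro l
      induction l with
      | nil => exact fun t => ⟨rfl, rfl⟩
      | cons c l ihl =>
        intro t
        simp only [List.foldl_cons]
        exact ⟨((ihl _).1).trans (ih c t).1, ((ihl _).2).trans (ih c t).2⟩
    simp only [pvDfsA]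
    split_ifs with h
    · simp
    · simp only [pvSetD_length]
      rw [pvFoldA_fst E f]
      exact ⟨(hfold _ _).1, (hfold _ _).2⟩

theorem pvDfsA_frame (E : List (List Int)) : ∀ (f : Nat) (v : Int) (s : List Int × List Int)
    (u : Int), 0 ≤ u → (∀ x ∈ pvReach E f v, 0 ≤ x) → u ∉ pvReach E f v →
    PySem.List.pyGetD (pvDfsA E f v s).1 u 0 = PySem.List.pyGetD s.1 u 0 ∧
    PySem.List.pyGetD (pvDfsA E f v s).2 u 0 = PySem.List.pyGetD s.2 u 0 := by
  intro f
  induction f with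
  | zero => exact fun v s u _ _ _ => ⟨rfl, rfl⟩
  | succ f ih =>
    intro v s u hu hnn hmem
    obtain ⟨ev, od⟩ := s
    have hv0 : 0 ≤ v := hnn v (by simp [pvReach])
    have hne : u ≠ v := by
      intro h; exact hmem (by simp [pvReach, h])
    have hflat : u ∉ (PySem.List.pyGetD E v []).flatMap (pvReach E f) := by
      intro h; exact hmem (by simp [pvReach, h])
    have hfold : ∀ (l : List Int) (t : List Int × List Int),
        (∀ c ∈ l, u ∉ pvReach E f c ∧ ∀ x ∈ pvReach E f c, 0 ≤ x) →
        PySem.List.pyGetD (l.foldl (fun t c => pvDfsA E f c t) t).1 u 0 = PySem.List.pyGetD t.1 u 0 ∧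
        PySem.List.pyGetD (l.foldl (fun t c => pvDfsA E f c t) t).2 u 0 = PySem.List.pyGetD t.2 u 0 := by
      intro l
      induction l with
      | nil => exact fun t _ => ⟨rfl, rfl⟩
      | cons c l ihl =>
        intro t hc
        simp only [List.foldl_cons]
        have h1 := ih c t u hu (hc c (by simp)).2 (hc c (by simp)).1
        have h2 := ihl (pvDfsA E f c t) (fun c' hc' => hc c' (by simp [hc']))
        exact ⟨h2.1.trans h1.1, h2.2.trans h1.2⟩
    simp only [pvDfsA]
    split_ifs with h
    · exact ⟨rfl, pvRW_ne od v u 1 hv0 hu hne⟩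
    · rw [pvFoldA_fst E f]
      constructor <;>
      · rw [pvRW_ne _ v u _ hv0 hu hne]
        have := hfold (PySem.List.pyGetD E v []) (ev, od) (fun c hc =>
          ⟨fun hx => hflat (List.mem_flatMap.mpr ⟨c, hc, hx⟩),
           fun x hx => hnn x (show x ∈ v :: (PySem.List.pyGetD E v []).flatMap (pvReach E f) from
             List.mem_cons.mpr (Or.inr (List.mem_flatMap.mpr ⟨c, hc, hx⟩)))⟩)
        first
        | exact this.1
        | exact this.2

theorem pvRunB_nil (E : List (List Int)) (fuel : Nat) (s : List Int × List Int) :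
    pvRunB E fuel [] s = s := by
  cases fuel <;> rfl

theorem pvReach_self (E : List (List Int)) (f : Nat) (v : Int) (hf : 1 ≤ f) :
    v ∈ pvReach E f v := by
  cases f with
  | zero => omega
  | succ f => simp [pvReach]

theorem pvFold_frame (E : List (List Int)) (f : Nat) :
    ∀ (l : List Int) (t : List Int × List Int) (u : Int), 0 ≤ u →
      (∀ c ∈ l, u ∉ pvReach E f c ∧ ∀ x ∈ pvReach E f c, 0 ≤ x) →
      PySem.List.pyGetD (l.foldl (fun t c => pvDfsA E f c t) t).1 u 0 = PySem.List.pyGetD t.1 u 0 ∧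
      PySem.List.pyGetD (l.foldl (fun t c => pvDfsA E f c t) t).2 u 0 = PySem.List.pyGetD t.2 u 0 := by
  intro l
  induction l with
  | nil => exact fun t u _ _ => ⟨rfl, rfl⟩
  | cons c l ihl =>
    intro t u hu hc
    simp only [List.foldl_cons]
    have h1 := pvDfsA_frame E f c t u hu (hc c (by simp)).2 (hc c (by simp)).1
    have h2 := ihl (pvDfsA E f c t) u hu (fun c' hc' => hc c' (by simp [hc']))
    exact ⟨h2.1.trans h1.1, h2.2.trans h1.2⟩

theorem pvPairFold (l : List Int) (g1 g2 : Int → Int → Int) :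
    ∀ (e o : Int),
      l.foldl (fun acc c => (g1 acc.1 c, g2 acc.2 c)) (e, o) = (l.foldl g1 e, l.foldl g2 o) := by
  induction l with
  | nil => intro e o; rfl
  | cons c l ihl => intro e o; simp only [List.foldl_cons]; exact ihl _ _

theorem pvRunB_step_false_nil (E : List (List Int)) (fuel : Nat) (v : Int)
    (rest : List (Int × Bool)) (ev od : List Int) (h : PySem.List.pyGetD E v [] = []) :
    pvRunB E (fuel + 1) ((v, false) :: rest) (ev, od)
      = pvRunB E fuel rest (ev, PySem.List.pySetD od v 1) := by
  simp [pvRunB, h]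

theorem pvRunB_step_false_cons (E : List (List Int)) (fuel : Nat) (v : Int)
    (rest : List (Int × Bool)) (ev od : List Int) (h : PySem.List.pyGetD E v [] ≠ []) :
    pvRunB E (fuel + 1) ((v, false) :: rest) (ev, od)
      = pvRunB E fuel
          ((PySem.List.pyGetD E v []).map (fun c => (c, false)) ++ (v, true) :: rest) (ev, od) := by
  simp only [pvRunB, if_pos h, pvPush_eq]
  rw [if_neg (by simp)]

theorem pvRunB_step_true (E : List (List Int)) (fuel : Nat) (v : Int)
    (rest : List (Int × Bool)) (ev od : List Int) :
    pvRunB E (fuel + 1) ((v, true) :: rest) (ev, od)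
      = pvRunB E fuel rest
          (PySem.List.pySetD ev v (PySem.Int.bxor
            ((PySem.List.pyGetD E v []).foldl
              (fun acc c => (min acc.1 (PySem.List.pyGetD ev c 0),
                             min acc.2 (PySem.List.pyGetD od c 0))) (1, 1)).1 1),
           PySem.List.pySetD od v (PySem.Int.bxor
            ((PySem.List.pyGetD E v []).foldl
              (fun acc c => (min acc.1 (PySem.List.pyGetD ev c 0),
                             min acc.2 (PySem.List.pyGetD od c 0))) (1, 1)).2 1)) := by
  simp [pvRunB]

theorem pvMain (P : List Int) (E : List (List Int)) (_hP : Pre_solve_tree P) (hE : pvGoodE P E) :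
    ∀ (f : Nat) (v : Int) (s : List Int × List Int) (k : Nat) (rest : List (Int × Bool)),
      pvEnough E f v → (pvReach E f v).Nodup → 0 ≤ v → v < (pvN P : Int) →
      s.1.length = pvN P → s.2.length = pvN P →
      pvRunB E (pvCost E f v + k) ((v, false) :: rest) s = pvRunB E k rest (pvDfsA E f v s) := by
  intro f
  induction f with
  | zero => intro v s k rest hEn; exact hEn.elim
  | succ f ih =>
    intro v s k rest hEn hNd hv0 hvN hl1 hl2
    obtain ⟨ev, od⟩ := s
    have hch := hE.2 v hv0 hvN
    by_cases h : PySem.List.pyGetD E v [] = []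
    · have hcost : pvCost E (f + 1) v = 1 := by simp [pvCost, h]
      rw [hcost, show 1 + k = k + 1 by omega, pvRunB_step_false_nil E k v rest ev od h]
      have hdfs : pvDfsA E (f + 1) v (ev, od) = (ev, PySem.List.pySetD od v 1) := by
        simp [pvDfsA, h]
      rw [hdfs]
    · -- internal node
      have hEnc : ∀ c ∈ PySem.List.pyGetD E v [], pvEnough E f c := hEn
      have hcb : ∀ c ∈ PySem.List.pyGetD E v [], 0 ≤ c ∧ c < (pvN P : Int) := by
        intro c hc
        have hdom := pvPar_dom ((hch.2 c).mp hc)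
        exact ⟨by omega, by unfold pvN; push_cast; omega⟩
      have hf1 : 1 ≤ f := by
        obtain ⟨c0, hc0⟩ := List.exists_mem_of_ne_nil _ h
        cases f with
        | zero => exact (hEnc c0 hc0).elim
        | succ f => omega
      have hflatnd : ((PySem.List.pyGetD E v []).flatMap (pvReach E f)).Nodup := by
        have : (v :: (PySem.List.pyGetD E v []).flatMap (pvReach E f)).Nodup := hNd
        exact (List.nodup_cons.mp this).2
      have hcost : pvCost E (f + 1) v
          = 2 + ((PySem.List.pyGetD E v []).map (pvCost E f)).sum := by
        simp [pvCost, h]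
      -- sequential processing of a block of child frames
      have hseq : ∀ (cs : List Int), (∀ c ∈ cs, c ∈ PySem.List.pyGetD E v []) →
          (cs.flatMap (pvReach E f)).Nodup →
          ∀ (t : List Int × List Int), t.1.length = pvN P → t.2.length = pvN P →
          ∀ (k' : Nat) (rest' : List (Int × Bool)),
          pvRunB E ((cs.map (pvCost E f)).sum + k') (cs.map (fun c => (c, false)) ++ rest') t
            = pvRunB E k' rest' (cs.foldl (fun t c => pvDfsA E f c t) t) := by
        intro cs
        induction cs with
        | nil => intro _ _ t _ _ k' rest'; simp
        | cons c cs ihc =>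
          intro hsub hnd t ht1 ht2 k' rest'
          obtain ⟨t1, t2⟩ := t
          simp only [List.map_cons, List.sum_cons, List.cons_append, List.foldl_cons]
          have hcm := hsub c (by simp)
          have hcr := hcb c hcm
          have hndc : (pvReach E f c).Nodup := by
            rw [List.flatMap_cons, List.nodup_append] at hnd
            exact hnd.1
          have hndcs : (cs.flatMap (pvReach E f)).Nodup := by
            rw [List.flatMap_cons, List.nodup_append] at hnd
            exact hnd.2.1
          rw [Nat.add_assoc]
          rw [ih c (t1, t2) ((cs.map (pvCost E f)).sum + k') (cs.map (fun c => (c, false)) ++ rest')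
              (hEnc c hcm) hndc hcr.1 hcr.2 ht1 ht2]
          have hlen := pvDfsA_length E f c (t1, t2)
          exact ihc (fun c' hc' => hsub c' (by simp [hc'])) hndcs _
            (by rw [hlen.1]; exact ht1) (by rw [hlen.2]; exact ht2) k' rest'
      rw [hcost, show 2 + ((PySem.List.pyGetD E v []).map (pvCost E f)).sum + k
            = (((PySem.List.pyGetD E v []).map (pvCost E f)).sum + (1 + k)) + 1 by omega,
          pvRunB_step_false_cons E _ v rest ev od h,
          hseq (PySem.List.pyGetD E v []) (fun _ hc => hc) hflatnd (ev, od) hl1 hl2 (1 + k)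
            ((v, true) :: rest)]
      -- combine step: the machine reads the finished children from the final arrays;
      -- since the children's reach-sets are disjoint, those reads equal A's immediate reads
      have hacc : ∀ (cs : List Int), (∀ c ∈ cs, c ∈ PySem.List.pyGetD E v []) →
          (cs.flatMap (pvReach E f)).Nodup →
          ∀ (t : List Int × List Int) (e o : Int),
          cs.foldl (fun acc nv =>
              (pvDfsA E f nv acc.1,
               min acc.2.1 (PySem.List.pyGetD (pvDfsA E f nv acc.1).1 nv 0),
               min acc.2.2 (PySem.List.pyGetD (pvDfsA E f nv acc.1).2 nv 0))) (t, e, o)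
            = (cs.foldl (fun t c => pvDfsA E f c t) t,
               cs.foldl (fun a c =>
                 min a (PySem.List.pyGetD (cs.foldl (fun t c => pvDfsA E f c t) t).1 c 0)) e,
               cs.foldl (fun a c =>
                 min a (PySem.List.pyGetD (cs.foldl (fun t c => pvDfsA E f c t) t).2 c 0)) o) := by
        intro cs
        induction cs with
        | nil => intro _ _ t e o; rfl
        | cons c cs ihc =>
          intro hsub hnd t e o
          have hcm := hsub c (by simp)
          have hcr := hcb c hcm
          have hndcs : (cs.flatMap (pvReach E f)).Nodup := by
            rw [List.flatMap_cons, List.nodup_append] at hnd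
            exact hnd.2.1
          have hdisj : ∀ c' ∈ cs, c ∉ pvReach E f c' ∧ ∀ x ∈ pvReach E f c', 0 ≤ x := by
            intro c' hc'
            constructor
            · intro hcin
              rw [List.flatMap_cons, List.nodup_append] at hnd
              exact hnd.2.2 c (pvReach_self E f c hf1) c
                (List.mem_flatMap.mpr ⟨c', hc', hcin⟩) rfl
            · intro x hx
              have hcr' := hcb c' (hsub c' (by simp [hc']))
              exact (pvReach_range P E hE f c' hcr'.1 hcr'.2 x hx).1
          simp only [List.foldl_cons]
          rw [ihc (fun c' hc' => hsub c' (by simp [hc'])) hndcs (pvDfsA E f c t)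
              (min e (PySem.List.pyGetD (pvDfsA E f c t).1 c 0))
              (min o (PySem.List.pyGetD (pvDfsA E f c t).2 c 0))]
          have hpers := pvFold_frame E f cs (pvDfsA E f c t) c hcr.1 hdisj
          rw [hpers.1, hpers.2]
      rw [show (1 : Nat) + k = k + 1 by omega]
      rw [show (PySem.List.pyGetD E v []).foldl (fun t c => pvDfsA E f c t) (ev, od)
            = (((PySem.List.pyGetD E v []).foldl (fun t c => pvDfsA E f c t) (ev, od)).1,
               ((PySem.List.pyGetD E v []).foldl (fun t c => pvDfsA E f c t) (ev, od)).2) from rfl]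
      rw [pvRunB_step_true]
      apply congrArg (pvRunB E k rest)
      have hdfs : pvDfsA E (f + 1) v (ev, od)
          = (PySem.List.pySetD ((PySem.List.pyGetD E v []).foldl (fun acc nv =>
               (pvDfsA E f nv acc.1,
                min acc.2.1 (PySem.List.pyGetD (pvDfsA E f nv acc.1).1 nv 0),
                min acc.2.2 (PySem.List.pyGetD (pvDfsA E f nv acc.1).2 nv 0)))
               ((ev, od), 1, 1)).1.1 v
               (PySem.Int.bxor ((PySem.List.pyGetD E v []).foldl (fun acc nv =>
                 (pvDfsA E f nv acc.1,
                  min acc.2.1 (PySem.List.pyGetD (pvDfsA E f nv acc.1).1 nv 0),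
                  min acc.2.2 (PySem.List.pyGetD (pvDfsA E f nv acc.1).2 nv 0)))
                 ((ev, od), 1, 1)).2.1 1),
             PySem.List.pySetD ((PySem.List.pyGetD E v []).foldl (fun acc nv =>
               (pvDfsA E f nv acc.1,
                min acc.2.1 (PySem.List.pyGetD (pvDfsA E f nv acc.1).1 nv 0),
                min acc.2.2 (PySem.List.pyGetD (pvDfsA E f nv acc.1).2 nv 0)))
               ((ev, od), 1, 1)).1.2 v
               (PySem.Int.bxor ((PySem.List.pyGetD E v []).foldl (fun acc nv =>
                 (pvDfsA E f nv acc.1,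
                  min acc.2.1 (PySem.List.pyGetD (pvDfsA E f nv acc.1).1 nv 0),
                  min acc.2.2 (PySem.List.pyGetD (pvDfsA E f nv acc.1).2 nv 0)))
                 ((ev, od), 1, 1)).2.2 1)) := by
        simp [pvDfsA, h]
      rw [hdfs, hacc (PySem.List.pyGetD E v []) (fun _ hc => hc) hflatnd (ev, od) 1 1]
      rw [pvPairFold (PySem.List.pyGetD E v [])
            (fun a c => min a (PySem.List.pyGetD
              ((PySem.List.pyGetD E v []).foldl (fun t c => pvDfsA E f c t) (ev, od)).1 c 0))
            (fun a c => min a (PySem.List.pyGetD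
              ((PySem.List.pyGetD E v []).foldl (fun t c => pvDfsA E f c t) (ev, od)).2 c 0)) 1 1]

-- ===== VERDICT (by name: the statement is the Claim_ definition above) =====
theorem solve_tree_spec : Claim_equal_solve_tree := by
  intro P _ hPre
  show solve_tree P = solve_tree_alt P
  have hE := pvBuildE_good P hPre
  have hN0 : (0 : Int) < (pvN P : Int) := by unfold pvN; push_cast; omega
  have hEn := pvEnough_root P _ hPre hE
  have hNd := pvReach_nodup P _ hE (pvN P)
  have hrange := pvReach_range P _ hE (pvN P) 0 le_rfl hN0
  have hlenR : (pvReach (pvBuildE P) (pvN P) 0).length ≤ pvN P :=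
    pvNodupRange_length (pvN P) _ hNd hrange
  have hcost : pvCost (pvBuildE P) (pvN P) 0 ≤ 2 * pvN P :=
    le_trans (pvCost_le _ _ _) (by omega)
  have hstate : pvRunB (pvBuildE P) (2 * pvN P) [((0 : Int), false)]
      (List.replicate (pvN P) (0 : Int), List.replicate (pvN P) (0 : Int))
      = pvDfsA (pvBuildE P) (pvN P) 0
        (List.replicate (pvN P) (0 : Int), List.replicate (pvN P) (0 : Int)) := by
    rw [show 2 * pvN P
          = pvCost (pvBuildE P) (pvN P) 0 + (2 * pvN P - pvCost (pvBuildE P) (pvN P) 0)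
        by omega]
    rw [pvMain P _ hPre hE (pvN P) 0 _ _ [] hEn hNd le_rfl hN0 (by simp) (by simp)]
    exact pvRunB_nil _ _ _
  simp only [solve_tree, solve_tree_alt]
  rw [show P.length + 1 = pvN P from rfl, hstate]
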